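-- pv_equiv track=rewrite | github.com/sukhesai/algorithms_and_data_structures | algorithms and ds/testtttt.py | solution
-- ===== SOURCE A (Python) =====
-- def solution(s):
--     def binary_search(x): # returns index of leftmost qn which is greater than x
--         l,r=0,len(pq_arr)-1
--         while l!=r:
--             m = (l+r)//2
--             if pq_arr[m][1] <= x:
--                 l = m+1
--             else:
--                 r = m
--         return l
--     s = int(s)
--     pq_arr = [(0,1),(1,2)]  # this is list of (pn,qn) where pn/qn is nth convergent of continued fraction of root(2)-1
--     i = 1
--     while pq_arr[i][1] <= s:
--         pq_arr.append((2*pq_arr[i][0]+pq_arr[i-1][0],2*pq_arr[i][1]+pq_arr[i-1][1]))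
--         i += 1
--     ans = (s*(s+1))//2
--     while s > 0:
--         i = binary_search(s)
--         x = 1 if i%2 == 1 else -1
--         b, k = s//pq_arr[i-1][1], s%pq_arr[i-1][1]
--         ans += ((b*(b*pq_arr[i-1][0]*pq_arr[i-1][1]+pq_arr[i-1][0]-pq_arr[i-1][1]+x))//2)
--         ans += (k*b*pq_arr[i-1][0])
--         s = k
--     return str(ans)
-- ===== SOURCE B (Python) =====
-- def solution(s):
--     s = int(s)
--     ans = (s * (s + 1)) // 2
--     while s > 0:
--         # regenerate sqrt(2)-1 convergents up to s: largest denominator q_prev <= s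
--         pp, qp, p, q = 0, 1, 1, 2
--         idx = 1  # index of (p, q)
--         while q <= s:
--             pp, qp, p, q = p, q, 2 * p + pp, 2 * q + qp
--             idx += 1
--         x = 1 if idx % 2 == 1 else -1
--         b, k = s // qp, s % qp
--         ans += (b * (b * pp * qp + pp - qp + x)) // 2
--         ans += k * b * pp
--         s = k
--     return str(ans)
-- ===== Notes on version B (the rewrite author's own statement) =====
-- stated objective: alternative
-- what changed: B drops A's precomputed convergent table and hand-written binary search: each reduction step regenerates the sqrt(2)-1 convergents by iterating the recurrence (p,q)->(2p+p_prev,2q+q_prev) from (0,1),(1,2), keeping the largest denominator <= s and its index, so no list and no search remain.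
import Mathlib
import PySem

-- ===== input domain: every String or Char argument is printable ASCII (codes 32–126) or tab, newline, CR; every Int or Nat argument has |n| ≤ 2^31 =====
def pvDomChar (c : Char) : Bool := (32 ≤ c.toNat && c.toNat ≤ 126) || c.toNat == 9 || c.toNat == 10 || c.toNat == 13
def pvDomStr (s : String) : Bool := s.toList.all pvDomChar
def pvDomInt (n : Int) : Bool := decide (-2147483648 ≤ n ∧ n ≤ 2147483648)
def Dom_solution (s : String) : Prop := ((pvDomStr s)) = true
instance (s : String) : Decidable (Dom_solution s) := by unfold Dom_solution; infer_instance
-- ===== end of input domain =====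

-- B replaces A's precomputed convergent table + binary search by regenerating the
-- convergents from the recurrence in each reduction step (alternative decomposition, same cost).


-- ===== PORT A =====
-- A's inner `binary_search` (while l != r); fuel only makes the loop total, it is
-- always sufficient on reachable calls.
def bsearchA (arr : List (Int × Int)) (x : Int) : Nat → Nat → Nat → Nat
  | 0, l, _ => l
  | fuel + 1, l, r =>
    if l ≠ r then
      let m := (l + r) / 2
      if (arr.getD m (0, 0)).2 ≤ x then bsearchA arr x fuel (m + 1) r
      else bsearchA arr x fuel l m
    else l

-- A's table-building `while pq_arr[i][1] <= s` loop (fuel = totality guard).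
def buildA (s : Int) : List (Int × Int) → Nat → Nat → List (Int × Int)
  | arr, _, 0 => arr
  | arr, i, fuel + 1 =>
    if (arr.getD i (0, 0)).2 ≤ s then
      buildA s
        (arr ++ [(2 * (arr.getD i (0, 0)).1 + (arr.getD (i - 1) (0, 0)).1,
                  2 * (arr.getD i (0, 0)).2 + (arr.getD (i - 1) (0, 0)).2)])
        (i + 1) fuel
    else arr

-- A's outer `while s > 0` loop (fuel = totality guard).
def loopA (arr : List (Int × Int)) : Int → Int → Nat → Int
  | _, ans, 0 => ans
  | s, ans, fuel + 1 =>
    if 0 < s then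
      let i := bsearchA arr s (arr.length + 1) 0 (arr.length - 1)
      let x : Int := if i % 2 = 1 then 1 else -1
      let pq := arr.getD (i - 1) (0, 0)
      let b := PySem.Int.floordiv s pq.2
      let k := PySem.Int.mod s pq.2
      let ans1 := ans + PySem.Int.floordiv (b * (b * pq.1 * pq.2 + pq.1 - pq.2 + x)) 2
      let ans2 := ans1 + k * b * pq.1
      loopA arr k ans2 fuel
    else ans

def solution (s : String) : String :=
  match PySem.Int.ofStr? s with
  | none => ""   -- unreachable under Pre_solution (Python raises ValueError)
  | some n =>
    let arr := buildA n [(0, 1), (1, 2)] 1 (n.toNat + 1)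
    PySem.Int.toStr (loopA arr n (PySem.Int.floordiv (n * (n + 1)) 2) (n.toNat + 1))

-- ===== PORT B =====
-- B's inner `while q <= s` regeneration loop: returns the last convergent with
-- denominator ≤ s together with the (1-based) index of its successor.
def findB (s : Int) : Int → Int → Int → Int → Nat → Nat → (Int × Int) × Nat
  | pp, qp, _, _, idx, 0 => ((pp, qp), idx)
  | pp, qp, p, q, idx, fuel + 1 =>
    if q ≤ s then findB s p q (2 * p + pp) (2 * q + qp) (idx + 1) fuel
    else ((pp, qp), idx)

-- B's outer `while s > 0` loop (fuel = totality guard).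
def loopB : Int → Int → Nat → Int
  | _, ans, 0 => ans
  | s, ans, fuel + 1 =>
    if 0 < s then
      let r := findB s 0 1 1 2 1 (s.toNat + 1)
      let x : Int := if r.2 % 2 = 1 then 1 else -1
      let b := PySem.Int.floordiv s r.1.2
      let k := PySem.Int.mod s r.1.2
      let ans1 := ans + PySem.Int.floordiv (b * (b * r.1.1 * r.1.2 + r.1.1 - r.1.2 + x)) 2
      let ans2 := ans1 + k * b * r.1.1
      loopB k ans2 fuel
    else ans

def solution_alt (s : String) : String :=
  match PySem.Int.ofStr? s with
  | none => ""   -- unreachable under Pre_solution (Python raises ValueError)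
  | some n =>
    PySem.Int.toStr (loopB n (PySem.Int.floordiv (n * (n + 1)) 2) (n.toNat + 1))

-- ===== PRECONDITION & SPEC =====
-- Pre_ excludes exactly the strings on which Python's int(s) raises ValueError (A returns on everything else).
def Pre_solution (s : String) : Prop := (PySem.Int.ofStr? s).isSome = true
instance (s : String) : Decidable (Pre_solution s) := by unfold Pre_solution; infer_instance
def pvWitness_solution : String := "7"
def Spec_solution (s : String) (out : String) : Prop := out = solution_alt s
instance (s : String) (out : String) : Decidable (Spec_solution s out) := by unfold Spec_solution; infer_instance

-- ===== CLAIM (what is proved, stated in full; the proofs are below) =====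
def Claim_equal_solution : Prop := ∀ (s : String), Dom_solution s → Pre_solution s → Spec_solution s (solution s)

-- ===== LEMMAS AND PROOFS =====

-- (conv n, conv (n+1)) where conv n is the n-th convergent (p_n, q_n) of sqrt(2)-1.
def cv : Nat → (Int × Int) × (Int × Int)
  | 0 => ((0, 1), (1, 2))
  | n + 1 => ((cv n).2, (2 * (cv n).2.1 + (cv n).1.1, 2 * (cv n).2.2 + (cv n).1.2))

def conv (n : Nat) : Int × Int := (cv n).1
def qd (n : Nat) : Int := (conv n).2
def table (k : Nat) : List (Int × Int) := (List.range k).map conv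

lemma conv_succ_succ (n : Nat) :
    conv (n + 2) = (2 * (conv (n + 1)).1 + (conv n).1, 2 * (conv (n + 1)).2 + (conv n).2) := rfl

lemma qd_step (n : Nat) : 1 ≤ qd n ∧ qd n < qd (n + 1) := by
  induction n with
  | zero => decide
  | succ m ih => simp [qd, conv, cv] at ih ⊢; omega

lemma qd_pos (n : Nat) : 1 ≤ qd n := (qd_step n).1

lemma qd_mono : StrictMono qd := strictMono_nat_of_lt_succ (fun n => (qd_step n).2)

lemma qd_ge (n : Nat) : (n : Int) + 1 ≤ qd n := by
  induction n with
  | zero => decide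
  | succ m ih => have := (qd_step m).2; push_cast; omega

lemma exists_qd_gt (s : Int) : ∃ i, s < qd i := by
  refine ⟨s.toNat, ?_⟩
  have h1 := qd_ge s.toNat
  have h2 : s ≤ (s.toNat : Int) := Int.self_le_toNat s
  omega

def Nq (s : Int) : Nat := Nat.find (exists_qd_gt s)

lemma lt_qd_Nq (s : Int) : s < qd (Nq s) := Nat.find_spec (exists_qd_gt s)

lemma qd_le_of_lt_Nq {s : Int} {j : Nat} (h : j < Nq s) : qd j ≤ s := by
  have := Nat.find_min (exists_qd_gt s) h
  omega

lemma Nq_le {s : Int} {i : Nat} (h : s < qd i) : Nq s ≤ i := Nat.find_le h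

lemma Nq_pos {s : Int} (h : 1 ≤ s) : 1 ≤ Nq s := by
  by_contra hc
  have h0 : Nq s = 0 := by omega
  have := lt_qd_Nq s
  rw [h0] at this
  have : qd 0 = 1 := by decide
  omega

lemma Nq_le_toNat (s : Int) : Nq s ≤ s.toNat := by
  apply Nq_le
  have h1 := qd_ge s.toNat
  have h2 : s ≤ (s.toNat : Int) := Int.self_le_toNat s
  omega

lemma Nq_mono {s n : Int} (h : s ≤ n) : Nq s ≤ Nq n :=
  Nq_le (lt_of_le_of_lt h (lt_qd_Nq n))

lemma table_length (k : Nat) : (table k).length = k := by simp [table]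

lemma table_getD {j k : Nat} (h : j < k) (d : Int × Int) : (table k).getD j d = conv j := by
  rw [List.getD_eq_getElem]
  · simp [table]
  · simpa [table] using h

lemma table_succ (k : Nat) : table (k + 1) = table k ++ [conv k] := by
  simp [table, List.range_succ]

lemma buildA_spec (n : Int) :
    ∀ fuel i, 1 ≤ i → i ≤ Nq n → Nq n ≤ i + fuel →
      buildA n (table (i + 1)) i fuel = table (Nq n + 1) := by
  intro fuel
  induction fuel with
  | zero =>
    intro i _ h2 h3
    have : i = Nq n := by omega
    simp [buildA, this]
  | succ f ih =>
    intro i h1 h2 h3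
    rw [buildA]
    rw [table_getD (by omega), table_getD (by omega)]
    by_cases hq : (conv i).2 ≤ n
    · rw [if_pos hq]
      have hiN : i < Nq n := by
        rcases Nat.lt_or_ge i (Nq n) with h | h
        · exact h
        · have := qd_mono.monotone h
          have := lt_qd_Nq n
          unfold qd at *
          omega
      have hpair : (2 * (conv i).1 + (conv (i - 1)).1, 2 * (conv i).2 + (conv (i - 1)).2)
          = conv (i + 1) := by
        have hi : i - 1 + 2 = i + 1 := by omega
        have hi2 : i - 1 + 1 = i := by omega
        rw [← hi, conv_succ_succ, hi2]
      rw [hpair, ← table_succ]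
      exact ih (i + 1) (by omega) (by omega) (by omega)
    · rw [if_neg hq]
      have : Nq n ≤ i := Nq_le (by unfold qd; omega)
      have : i = Nq n := by omega
      rw [this]

lemma bsearchA_spec (n s : Int) (h1 : 1 ≤ s) :
    ∀ fuel l r, l ≤ r → r ≤ Nq n → (l = 0 ∨ qd (l - 1) ≤ s) → s < qd r → r - l ≤ fuel →
      bsearchA (table (Nq n + 1)) s fuel l r = Nq s := by
  have final : ∀ l, (l = 0 ∨ qd (l - 1) ≤ s) → s < qd l → l = Nq s := by
    intro l hl hr
    have hle : Nq s ≤ l := Nq_le hr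
    rcases hl with h0 | hq
    · subst h0
      have : qd 0 = 1 := by decide
      omega
    · by_contra hne
      have hlt : Nq s < l := by omega
      have : Nq s ≤ l - 1 := by omega
      have := qd_mono.monotone this
      have := lt_qd_Nq s
      omega
  intro fuel
  induction fuel with
  | zero =>
    intro l r hlr hrN hl hr hf
    have : l = r := by omega
    subst this
    rw [bsearchA]
    exact final l hl hr
  | succ f ih =>
    intro l r hlr hrN hl hr hf
    rw [bsearchA]
    by_cases hne : l ≠ r
    · rw [if_pos hne]
      have hm1 : l ≤ (l + r) / 2 := by omega
      have hm2 : (l + r) / 2 < r := by omega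
      simp only [table_getD (show (l + r) / 2 < Nq n + 1 by omega)]
      by_cases hq : (conv ((l + r) / 2)).2 ≤ s
      · rw [if_pos hq]
        exact ih ((l + r) / 2 + 1) r (by omega) hrN (Or.inr (by simpa [qd] using hq)) hr (by omega)
      · rw [if_neg hq]
        exact ih l ((l + r) / 2) (by omega) (by omega) hl (by unfold qd; omega) (by omega)
    · rw [if_neg hne]
      have : l = r := by omega
      subst this
      exact final l hl hr

lemma findB_spec (s : Int) :
    ∀ fuel idx, 1 ≤ idx → idx ≤ Nq s → Nq s ≤ idx + fuel →
      findB s (conv (idx - 1)).1 (conv (idx - 1)).2 (conv idx).1 (conv idx).2 idx fuel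
        = (conv (Nq s - 1), Nq s) := by
  intro fuel
  induction fuel with
  | zero =>
    intro idx h2 h3 h4
    have : idx = Nq s := by omega
    subst this
    rfl
  | succ f ih =>
    intro idx h2 h3 h4
    rw [findB]
    by_cases hq : (conv idx).2 ≤ s
    · rw [if_pos hq]
      have hiN : idx < Nq s := by
        rcases Nat.lt_or_ge idx (Nq s) with h | h
        · exact h
        · have := qd_mono.monotone h
          have := lt_qd_Nq s
          unfold qd at *
          omega
      have e : conv (idx + 1)
          = (2 * (conv idx).1 + (conv (idx - 1)).1, 2 * (conv idx).2 + (conv (idx - 1)).2) := by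
        have hi : idx - 1 + 2 = idx + 1 := by omega
        have hi2 : idx - 1 + 1 = idx := by omega
        rw [← hi, conv_succ_succ, hi2]
      rw [show (2 * (conv idx).1 + (conv (idx - 1)).1 : Int) = (conv (idx + 1)).1 by rw [e],
          show (2 * (conv idx).2 + (conv (idx - 1)).2 : Int) = (conv (idx + 1)).2 by rw [e]]
      have := ih (idx + 1) (by omega) (by omega) (by omega)
      simpa using this
    · rw [if_neg hq]
      have hge : Nq s ≤ idx := Nq_le (by unfold qd; omega)
      have : idx = Nq s := by omega
      subst this
      rfl

lemma loop_eq (n : Int) :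
    ∀ fuel s ans, 1 ≤ s → s ≤ n →
      loopA (table (Nq n + 1)) s ans fuel = loopB s ans fuel := by
  intro fuel
  induction fuel with
  | zero => intro s ans _ _; rfl
  | succ f ih =>
    intro s ans hs hsn
    rw [loopA, loopB, if_pos (by omega : (0:Int) < s), if_pos (by omega : (0:Int) < s)]
    -- A's binary search returns Nq s
    have hlen : (table (Nq n + 1)).length = Nq n + 1 := table_length _
    have hbs : bsearchA (table (Nq n + 1)) s ((table (Nq n + 1)).length + 1) 0
        ((table (Nq n + 1)).length - 1) = Nq s := by
      rw [hlen]
      have hr : (Nq n + 1) - 1 = Nq n := by omega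
      rw [hr]
      exact bsearchA_spec n s hs (Nq n + 2) 0 (Nq n) (by omega) (by omega) (Or.inl rfl)
        (by have := lt_qd_Nq n; omega) (by omega)
    -- B's regeneration returns (conv (Nq s - 1), Nq s)
    have hfb : findB s 0 1 1 2 1 (s.toNat + 1) = (conv (Nq s - 1), Nq s) := by
      have h0 : (conv 0).1 = 0 ∧ (conv 0).2 = 1 ∧ (conv 1).1 = 1 ∧ (conv 1).2 = 2 := by decide
      have := findB_spec s (s.toNat + 1) 1 (by omega) (Nq_pos hs)
        (by have := Nq_le_toNat s; omega)
      simpa [h0.1, h0.2.1, h0.2.2.1, h0.2.2.2] using this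
    have hget : (table (Nq n + 1)).getD (Nq s - 1) (0, 0) = conv (Nq s - 1) := by
      apply table_getD
      have := Nq_mono hsn
      omega
    rw [hbs, hfb]
    simp only [hget]
    -- remaining state is identical; recurse
    have hq1 : 1 ≤ (conv (Nq s - 1)).2 := qd_pos (Nq s - 1)
    have hqle : (conv (Nq s - 1)).2 ≤ s := by
      have : Nq s - 1 < Nq s := by have := Nq_pos hs; omega
      exact qd_le_of_lt_Nq this
    set qp := (conv (Nq s - 1)).2 with hqp
    have hk1 : PySem.Int.mod s qp < qp := PySem.Int.mod_lt s (by omega)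
    have hk0 : 0 ≤ PySem.Int.mod s qp := PySem.Int.mod_nonneg s (by omega)
    by_cases hk : 1 ≤ PySem.Int.mod s qp
    · exact ih _ _ hk (by omega)
    · have hz : PySem.Int.mod s qp = 0 := by omega
      rw [hz]
      cases f with
      | zero => rfl
      | succ f' =>
        rw [loopA, loopB]
        simp

lemma loopA_nonpos (arr : List (Int × Int)) (s ans : Int) (hs : ¬ 0 < s) (fuel : Nat) :
    loopA arr s ans (fuel + 1) = ans := by rw [loopA, if_neg hs]

lemma loopB_nonpos (s ans : Int) (hs : ¬ 0 < s) (fuel : Nat) :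
    loopB s ans (fuel + 1) = ans := by rw [loopB, if_neg hs]

-- ===== VERDICT (by name: the statement is the Claim_ definition above) =====
theorem solution_spec : Claim_equal_solution := by
  intro s _ hpre
  unfold Spec_solution solution solution_alt
  cases hof : PySem.Int.ofStr? s with
  | none => simp [Pre_solution, hof] at hpre
  | some n =>
    simp only []
    by_cases hn : 1 ≤ n
    · have harr : buildA n [(0, 1), (1, 2)] 1 (n.toNat + 1) = table (Nq n + 1) := by
        have h2 : ([(0, 1), (1, 2)] : List (Int × Int)) = table 2 := by decide
        rw [h2]
        exact buildA_spec n (n.toNat + 1) 1 (by omega) (Nq_pos hn)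
          (by have := Nq_le_toNat n; omega)
      rw [harr, loop_eq n (n.toNat + 1) n _ hn le_rfl]
    · have ht : n.toNat = 0 := by omega
      rw [ht, loopA_nonpos _ _ _ (by omega) 0, loopB_nonpos _ _ (by omega) 0]
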